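-- pv_equiv track=rewrite | github.com/yuefan98/nleis.py | nleis/fitting.py | extract_circuit_elements
-- ===== SOURCE A (Python) =====
-- ints = '0123456789'
--
-- def extract_circuit_elements(circuit):
--     """ Extracts circuit elements from a circuit string.
--
--     Parameters
--     ----------
--     circuit : str
--         Circuit string.
--
--     Returns
--     -------
--     extracted_elements : list
--         list of extracted elements.
--
--     """
--     p_string = [x for x in circuit if x not in 'p(),-d']
--     extracted_elements = []
--     current_element = []
--     length = len(p_string)
--     for i, char in enumerate(p_string):
--         if char not in ints:
--             current_element.append(char)
--         else:
--             # min to prevent looking ahead past end of list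
--             if p_string[min(i+1, length-1)] not in ints:
--                 current_element.append(char)
--                 extracted_elements.append(''.join(current_element))
--                 current_element = []
--             else:
--                 current_element.append(char)
--     extracted_elements.append(''.join(current_element))
--     return extracted_elements
-- ===== SOURCE B (Python) =====
-- ints = '0123456789'
--
--
-- def _span(s, pred):
--     """Longest prefix of list s whose items satisfy pred, plus the rest."""
--     n = 0
--     while n < len(s) and pred(s[n]):
--         n += 1
--     return s[:n], s[n:]
--
--
-- def extract_circuit_elements(circuit):
--     """Tokenize a circuit string by consuming, per token, a maximal run of
--     non-digit characters followed by a maximal run of digits."""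
--     s = [x for x in circuit if x not in 'p(),-d']
--     tokens = []
--     while True:
--         nd, rest = _span(s, lambda c: c not in ints)
--         dg, rest = _span(rest, lambda c: c in ints)
--         tokens.append(''.join(nd + dg))
--         if not rest:
--             return tokens
--         s = rest
-- ===== Notes on version B (the rewrite author's own statement) =====
-- stated objective: alternative
-- what changed: B tokenizes by repeatedly consuming a maximal non-digit run followed by a maximal digit run (span-based scan emitting one token per iteration), instead of A's per-character loop with min-clamped look-ahead indexing.
import Mathlib
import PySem

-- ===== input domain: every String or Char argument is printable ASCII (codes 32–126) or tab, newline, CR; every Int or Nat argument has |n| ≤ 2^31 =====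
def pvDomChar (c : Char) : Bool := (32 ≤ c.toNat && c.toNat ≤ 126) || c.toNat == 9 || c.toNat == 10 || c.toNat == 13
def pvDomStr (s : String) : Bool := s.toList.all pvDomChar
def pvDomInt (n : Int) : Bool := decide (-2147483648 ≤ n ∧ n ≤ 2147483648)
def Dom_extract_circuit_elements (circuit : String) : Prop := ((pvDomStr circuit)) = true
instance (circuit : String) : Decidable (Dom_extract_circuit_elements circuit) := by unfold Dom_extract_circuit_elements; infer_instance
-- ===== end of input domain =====

-- B re-tokenizes by consuming, per token, a maximal non-digit run followed by a maximal digit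
-- run (span-based two-pointer scan), replacing A's per-character look-ahead with min-clamped
-- indexing; same return value, alternative decomposition.

-- the module constant `ints` and the membership test `c in ints`, shared by both Pythons
def pvInts : List Char := "0123456789".toList
def pvIsDigit (c : Char) : Bool := pvInts.contains c

-- ===== PORT A =====
def extract_circuit_elements (circuit : String) : List String :=
  let p_string := circuit.toList.filter (fun x => !("p(),-d".toList.contains x))
  let length : Int := p_string.length
  let st := (PySem.List.enumerate p_string 0).foldl
    (fun (st : List String × List Char) ic =>
      let i := ic.1
      let char := ic.2
      if !(pvIsDigit char) then (st.1, st.2 ++ [char])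
      else
        -- p_string[min(i+1, length-1)]: the index is always in range when the loop runs
        if !(pvIsDigit (PySem.List.pyGetD p_string (min (i + 1) (length - 1)) ' ')) then
          (st.1 ++ [String.ofList (st.2 ++ [char])], [])
        else (st.1, st.2 ++ [char]))
    ([], [])
  st.1 ++ [String.ofList st.2]

-- ===== PORT B =====
-- _span(s, pred) of Source B: longest prefix satisfying pred, plus the rest
def pvSpan (p : Char → Bool) : List Char → List Char × List Char
  | [] => ([], [])
  | c :: rest =>
    if p c then
      let r := pvSpan p rest
      (c :: r.1, r.2)
    else ([], c :: rest)

lemma pvSpan_snd_length_le (p : Char → Bool) (s : List Char) :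
    (pvSpan p s).2.length ≤ s.length := by
  induction s with
  | nil => simp [pvSpan]
  | cons c rest ih =>
    simp only [pvSpan]
    split
    · simpa using Nat.le_succ_of_le ih
    · simp

lemma pvSpan_snd_head (p : Char → Bool) (s : List Char) (c : Char) (r : List Char)
    (h : (pvSpan p s).2 = c :: r) : p c = false := by
  induction s with
  | nil => simp [pvSpan] at h
  | cons d rest ih =>
    simp only [pvSpan] at h
    split at h
    · exact ih h
    · rename_i hd
      obtain ⟨rfl, rfl⟩ : d = c ∧ rest = r := by simpa using h
      simpa using hd

lemma pvSpan_lt_of_pos (p : Char → Bool) (c : Char) (t : List Char) (h : p c = true) :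
    (pvSpan p (c :: t)).2.length < (c :: t).length := by
  simp only [pvSpan, h, if_pos]
  exact Nat.lt_succ_of_le (pvSpan_snd_length_le p t)

-- the while-loop of Source B: one token per iteration, recursing on the strictly shorter rest
def pvTokB (s : List Char) : List String :=
  match h1 : pvSpan (fun c => !pvIsDigit c) s with
  | (nd, rest) =>
    match h2 : pvSpan pvIsDigit rest with
    | (dg, rest2) =>
      if h : rest2 = [] then [String.ofList (nd ++ dg)]
      else String.ofList (nd ++ dg) :: pvTokB rest2
termination_by s.length
decreasing_by
  have hr : rest ≠ [] := by
    intro he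
    rw [he] at h2
    simp [pvSpan] at h2
    exact h h2.2
  obtain ⟨c, t, rfl⟩ := List.exists_cons_of_ne_nil hr
  have hc : pvIsDigit c = true := by
    have := pvSpan_snd_head (fun c => !pvIsDigit c) s c t (by rw [h1])
    simpa using this
  have h3 : (pvSpan pvIsDigit (c :: t)).2.length < (c :: t).length :=
    pvSpan_lt_of_pos pvIsDigit c t hc
  rw [h2] at h3
  have h3' : rest2.length < (c :: t).length := by simpa using h3
  have h4 : (c :: t).length ≤ s.length := by
    have := pvSpan_snd_length_le (fun c => !pvIsDigit c) s
    rw [h1] at this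
    exact this
  omega

def extract_circuit_elements_alt (circuit : String) : List String :=
  pvTokB (circuit.toList.filter (fun x => !("p(),-d".toList.contains x)))

-- ===== PRECONDITION & SPEC =====
def Spec_extract_circuit_elements (circuit : String) (out : List String) : Prop := out = extract_circuit_elements_alt circuit
instance (circuit : String) (out : List String) : Decidable (Spec_extract_circuit_elements circuit out) := by unfold Spec_extract_circuit_elements; infer_instance

-- ===== CLAIM (what is proved, stated in full; the proofs are below) =====
def Claim_equal_extract_circuit_elements : Prop := ∀ (circuit : String), Dom_extract_circuit_elements circuit → Spec_extract_circuit_elements circuit (extract_circuit_elements circuit)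

-- ===== LEMMAS AND PROOFS =====

-- common recursive specification of the tokenizer: close the current element after a digit
-- that is followed by a non-digit
def pvTok (cur : List Char) : List Char → List String
  | [] => [String.ofList cur]
  | c :: rest =>
    if pvIsDigit c && !(pvIsDigit (rest.headD c)) then
      String.ofList (cur ++ [c]) :: pvTok [] rest
    else pvTok (cur ++ [c]) rest

-- A's loop step, named for the proofs (definitionally the lambda in the port)
def pvStepA (p : List Char) (st : List String × List Char) (ic : Int × Char) :
    List String × List Char :=
  if !(pvIsDigit ic.2) then (st.1, st.2 ++ [ic.2])
  else
    if !(pvIsDigit (PySem.List.pyGetD p (min (ic.1 + 1) ((p.length : Int) - 1)) ' ')) then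
      (st.1 ++ [String.ofList (st.2 ++ [ic.2])], [])
    else (st.1, st.2 ++ [ic.2])

lemma pyGetD_of_getElem? (p : List Char) (k : Nat) (c d : Char) (h : p[k]? = some c) :
    PySem.List.pyGetD p (k : Int) d = c := by
  simp [PySem.List.pyGetD_natCast, List.getD_eq_getElem?_getD, h]

lemma A_fold (p : List Char) :
    ∀ (t : List Char) (k : Nat), p.drop k = t →
    ∀ (exts : List String) (cur : List Char),
      (((PySem.List.enumerate t (k : Int)).foldl (pvStepA p) (exts, cur)).1
        ++ [String.ofList (((PySem.List.enumerate t (k : Int)).foldl (pvStepA p) (exts, cur)).2)])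
      = exts ++ pvTok cur t := by
  intro t
  induction t with
  | nil =>
    intro k hk exts cur
    simp [PySem.List.enumerate_nil, pvTok]
  | cons c rest ih =>
    intro k hk exts cur
    have hlen1 : p.length - k = rest.length + 1 := by
      have := congrArg List.length hk
      simpa using this
    have hk_lt : k < p.length := by omega
    have hget : p[k]? = some c := by
      have h0 : (p.drop k)[0]? = p[k + 0]? := List.getElem?_drop
      rw [hk] at h0
      simpa using h0.symm
    have hdrop : p.drop (k + 1) = rest := by
      have h1 : (p.drop k).drop 1 = p.drop (k + 1) := List.drop_drop
      rw [hk] at h1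
      simpa using h1.symm
    have hcast : (k : Int) + 1 = ((k + 1 : Nat) : Int) := by push_cast; ring
    simp only [PySem.List.enumerate_cons, List.foldl_cons]
    by_cases hd : pvIsDigit c
    · cases rest with
      | nil =>
        have hplen : p.length = k + 1 := by
          simp only [List.length_nil] at hlen1
          omega
        have hmin : min ((k : Int) + 1) ((p.length : Int) - 1) = (k : Int) := by
          rw [hplen]; push_cast; omega
        have hlook : PySem.List.pyGetD p (min ((k : Int) + 1) ((p.length : Int) - 1)) ' ' = c := by
          rw [hmin]
          exact pyGetD_of_getElem? p k c ' ' hget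
        simp [pvStepA, hd, hlook, PySem.List.enumerate_nil, pvTok]
      | cons d rest' =>
        have hmin : min ((k : Int) + 1) ((p.length : Int) - 1) = (k : Int) + 1 := by
          simp only [List.length_cons] at hlen1
          omega
        have hget2 : p[k + 1]? = some d := by
          have h0 : (p.drop (k + 1))[0]? = p[(k + 1) + 0]? := List.getElem?_drop
          rw [hdrop] at h0
          simpa using h0.symm
        have hlook : PySem.List.pyGetD p (min ((k : Int) + 1) ((p.length : Int) - 1)) ' ' = d := by
          rw [hmin, hcast]
          exact pyGetD_of_getElem? p (k + 1) d ' ' hget2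
        by_cases hdd : pvIsDigit d
        · simp only [pvStepA, hd, Bool.not_true, Bool.false_eq_true, if_neg, not_false_iff,
            hlook, hdd]
          rw [hcast, ih (k + 1) hdrop]
          simp [pvTok, hd, hdd]
        · simp only [pvStepA, hd, Bool.not_true, Bool.false_eq_true, if_neg, not_false_iff,
            hlook, hdd, Bool.not_false, if_pos]
          rw [hcast, ih (k + 1) hdrop]
          simp [pvTok, hd, hdd, List.append_assoc]
    · have hdf : pvIsDigit c = false := by simpa using hd
      simp only [pvStepA, hdf, Bool.not_false, if_pos]
      rw [hcast, ih (k + 1) hdrop]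
      simp [pvTok, hdf]

lemma tok_all_digit (dg : List Char) (h : ∀ c ∈ dg, pvIsDigit c = true) :
    ∀ cur, pvTok cur dg = [String.ofList (cur ++ dg)] := by
  induction dg with
  | nil => intro cur; simp [pvTok]
  | cons c rest ih =>
    intro cur
    have hc : pvIsDigit c = true := h c (by simp)
    have hhd : pvIsDigit (rest.headD c) = true := by
      cases rest with
      | nil => simpa using hc
      | cons d t => exact h d (by simp)
    have := ih (fun x hx => h x (by simp [hx])) (cur ++ [c])
    simp only [pvTok, hc, hhd, Bool.not_true, Bool.and_false, if_neg, Bool.false_eq_true,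
      not_false_iff]
    rw [this]
    simp

lemma tok_nondigit_prefix (nd : List Char) (h : ∀ c ∈ nd, pvIsDigit c = false) :
    ∀ r cur, pvTok cur (nd ++ r) = pvTok (cur ++ nd) r := by
  induction nd with
  | nil => intro r cur; simp
  | cons c rest ih =>
    intro r cur
    have hc : pvIsDigit c = false := h c (by simp)
    have := ih (fun x hx => h x (by simp [hx])) r (cur ++ [c])
    simp only [List.cons_append, pvTok, hc, Bool.false_and, if_neg, Bool.false_eq_true,
      not_false_iff]
    rw [this]
    simp

lemma tok_digit_close (dg : List Char) (hdg : dg ≠ []) (hall : ∀ c ∈ dg, pvIsDigit c = true)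
    (e : Char) (he : pvIsDigit e = false) :
    ∀ r' cur, pvTok cur (dg ++ e :: r') = String.ofList (cur ++ dg) :: pvTok [] (e :: r') := by
  induction dg with
  | nil => exact absurd rfl hdg
  | cons c rest ih =>
    intro r' cur
    have hc : pvIsDigit c = true := hall c (by simp)
    cases rest with
    | nil =>
      simp only [List.cons_append, List.nil_append, pvTok, hc, List.headD_cons, he,
        Bool.not_false, Bool.and_true, if_pos]
    | cons d t =>
      have hd : pvIsDigit d = true := hall d (by simp)
      have := ih (by simp) (fun x hx => hall x (by simp [hx])) r' (cur ++ [c])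
      simp only [List.cons_append, pvTok, hc, List.headD_cons, hd, Bool.not_true,
        Bool.and_false, if_neg, Bool.false_eq_true, not_false_iff] at this ⊢
      rw [this]
      simp

lemma pvSpan_append (p : Char → Bool) (s : List Char) :
    (pvSpan p s).1 ++ (pvSpan p s).2 = s := by
  induction s with
  | nil => simp [pvSpan]
  | cons c rest ih =>
    simp only [pvSpan]
    split
    · simpa using ih
    · simp

lemma pvSpan_fst_all (p : Char → Bool) (s : List Char) : ∀ c ∈ (pvSpan p s).1, p c = true := by
  induction s with
  | nil => simp [pvSpan]
  | cons c rest ih =>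
    simp only [pvSpan]
    split
    · rename_i hc
      intro x hx
      simp only [List.mem_cons] at hx
      rcases hx with rfl | hx
      · exact hc
      · exact ih x hx
    · simp

lemma tokB_ne_nil (s : List Char) : pvTokB s ≠ [] := by
  rw [pvTokB]
  split
  split
  split <;> simp

lemma tok_eq_tokB : ∀ (n : Nat) (s : List Char), s.length ≤ n →
    ∀ cur, pvTok cur s =
      match pvTokB s with
      | [] => []
      | t :: ts => String.ofList (cur ++ t.toList) :: ts := by
  intro n
  induction n with
  | zero =>
    intro s hs cur
    have : s = [] := by cases s <;> simp_all
    subst this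
    simp [pvTok, pvTokB, pvSpan]
  | succ n ih =>
    intro s hs cur
    rcases hsp1 : pvSpan (fun c => !pvIsDigit c) s with ⟨nd, rest⟩
    rcases hsp2 : pvSpan pvIsDigit rest with ⟨dg, rest2⟩
    have hnd_all : ∀ c ∈ nd, pvIsDigit c = false := by
      intro c hc
      have := pvSpan_fst_all (fun c => !pvIsDigit c) s c (by rw [hsp1]; exact hc)
      simpa using this
    have hdg_all : ∀ c ∈ dg, pvIsDigit c = true := by
      intro c hc
      exact pvSpan_fst_all pvIsDigit rest c (by rw [hsp2]; exact hc)
    have hs_eq : nd ++ rest = s := by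
      have := pvSpan_append (fun c => !pvIsDigit c) s
      rw [hsp1] at this
      exact this
    have hrest_eq : dg ++ rest2 = rest := by
      have := pvSpan_append pvIsDigit rest
      rw [hsp2] at this
      exact this
    have hB : pvTokB s = if rest2 = [] then [String.ofList (nd ++ dg)]
        else String.ofList (nd ++ dg) :: pvTokB rest2 := by
      rw [pvTokB]
      split
      rename_i nd' rest' h1'
      rw [hsp1] at h1'
      injection h1' with e1 e2
      subst e1
      subst e2
      split
      rename_i dg' rest2' h2'
      rw [hsp2] at h2'
      injection h2' with e3 e4
      subst e3
      subst e4
      rfl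
    have hlhs : pvTok cur s = pvTok (cur ++ nd) (dg ++ rest2) := by
      rw [← hs_eq, ← hrest_eq, tok_nondigit_prefix nd hnd_all]
    cases rest2 with
    | nil =>
      rw [hlhs]
      simp only [List.append_nil]
      rw [tok_all_digit dg hdg_all]
      rw [hB]
      simp [List.append_assoc]
    | cons e r' =>
      have he : pvIsDigit e = false := pvSpan_snd_head pvIsDigit rest e r' (by rw [hsp2])
      have hdg_ne : dg ≠ [] := by
        intro hdg0
        subst hdg0
        have : (pvSpan (fun c => !pvIsDigit c) s).2 = e :: r' := by
          rw [hsp1]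
          simpa using hrest_eq.symm
        have := pvSpan_snd_head (fun c => !pvIsDigit c) s e r' this
        simp [he] at this
      have hlt : (e :: r').length ≤ n := by
        have h1 : nd.length + rest.length = s.length := by
          have := congrArg List.length hs_eq
          simpa using this
        have h2 : dg.length + (e :: r').length = rest.length := by
          have := congrArg List.length hrest_eq
          simpa using this
        have h3 : 1 ≤ dg.length := by
          cases dg with
          | nil => exact absurd rfl hdg_ne
          | cons _ _ => simp
        omega
      rw [hlhs, tok_digit_close dg hdg_ne hdg_all e he r' (cur ++ nd)]
      have hIH := ih (e :: r') hlt []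
      have hrec : pvTok [] (e :: r') = pvTokB (e :: r') := by
        rw [hIH]
        cases hb : pvTokB (e :: r') with
        | nil => exact absurd hb (tokB_ne_nil (e :: r'))
        | cons t ts => simp
      rw [hrec, hB]
      simp [List.append_assoc]

-- ===== VERDICT (by name: the statement is the Claim_ definition above) =====
theorem extract_circuit_elements_spec : Claim_equal_extract_circuit_elements := by
  intro circuit _
  show extract_circuit_elements circuit = extract_circuit_elements_alt circuit
  have hA : extract_circuit_elements circuit
      = [] ++ pvTok [] (circuit.toList.filter (fun x => !("p(),-d".toList.contains x))) := by
    exact A_fold (circuit.toList.filter (fun x => !("p(),-d".toList.contains x)))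
      (circuit.toList.filter (fun x => !("p(),-d".toList.contains x))) 0 (by simp) [] []
  rw [hA]
  set fp := circuit.toList.filter (fun x => !("p(),-d".toList.contains x)) with hfp
  have h1 := tok_eq_tokB fp.length fp le_rfl []
  have h2 : pvTok [] fp = pvTokB fp := by
    rw [h1]
    cases hb : pvTokB fp with
    | nil => exact absurd hb (tokB_ne_nil fp)
    | cons t ts => simp
  rw [List.nil_append, h2]
  rfl
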